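-- pv_equiv track=rewrite | github.com/jackclayton247/puzzels | 2024/march/partiton.py | dupe
-- ===== SOURCE A (Python) =====
-- def dupe(possible):
--     temp = []
--     for item in possible:
--         temp.append(item)
--         for i in range(1, 10, 1):
--             if i == 1:
--                 if item.count(1) > 1: #removes lists with more than a single 1
--                     temp.remove(item)
--             else:
--                 if item.count(i) > 2:  #removes lists with more than 2 of a single number
--                     temp.remove(item)
--     return temp
-- ===== SOURCE B (Python) =====
-- def dupe(possible):
--     def ok(item):
--         if item.count(1) > 1:
--             return False
--         return all(item.count(i) <= 2 for i in range(2, 10))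
--     return [item for item in possible if ok(item)]
-- ===== Notes on version B (the rewrite author's own statement) =====
-- stated objective: simpler
-- what changed: Replaced the stateful append-then-remove loop over a shared temp list with a single stateless filter using a per-item validity predicate.
-- crash fix: On inputs containing an item with two or more violated digit limits, A raises ValueError (its second temp.remove finds no copy left); B returns the list of valid items. — e.g. on dupe([[1, 1, 2, 2, 2]]): A raises ValueError, B returns []
import Mathlib
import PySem

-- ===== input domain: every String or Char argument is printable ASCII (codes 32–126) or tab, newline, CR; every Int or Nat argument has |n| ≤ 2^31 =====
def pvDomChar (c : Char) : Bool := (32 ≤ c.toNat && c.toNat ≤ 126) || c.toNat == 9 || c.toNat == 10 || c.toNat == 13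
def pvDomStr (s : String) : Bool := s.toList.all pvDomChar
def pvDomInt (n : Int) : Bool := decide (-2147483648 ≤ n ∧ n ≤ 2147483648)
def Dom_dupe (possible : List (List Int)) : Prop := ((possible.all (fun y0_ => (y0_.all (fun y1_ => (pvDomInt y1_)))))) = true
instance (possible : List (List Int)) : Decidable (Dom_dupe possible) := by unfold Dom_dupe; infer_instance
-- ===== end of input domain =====

-- B replaces A's stateful append-then-repeatedly-remove loop over a shared temp list by a
-- stateless filter with a per-item validity predicate (objective: simpler).

-- ===== PORT A =====
-- inner 'for i in range(1, 10, 1)' loop of A; none = a ValueError has been raised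
def dupeInner (item : List Int) (acc : Option (List (List Int))) : Option (List (List Int)) :=
  (PySem.List.pyRange 1 10 1).foldl
    (fun a i => a.bind (fun temp =>
      if i == 1 then
        if PySem.List.count item 1 > 1 then PySem.List.remove? temp item else some temp
      else
        if PySem.List.count item i > 2 then PySem.List.remove? temp item else some temp))
    acc

def dupe (possible : List (List Int)) : List (List Int) :=
  (possible.foldl
    (fun acc item => dupeInner item (acc.map (fun temp => temp ++ [item])))
    (some ([] : List (List Int)))).getD []

-- ===== PORT B =====
def okItem (item : List Int) : Bool :=
  if PySem.List.count item 1 > 1 then false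
  else (PySem.List.pyRange 2 10 1).all (fun i => decide (PySem.List.count item i ≤ 2))

def dupe_alt (possible : List (List Int)) : List (List Int) :=
  possible.filter okItem

-- ===== PRECONDITION & SPEC =====
-- the list of the nine digit-limit tests A performs on an item (i = 1, …, 9)
def condsOf (item : List Int) : List Bool :=
  [decide (PySem.List.count item 1 > 1),
   decide (PySem.List.count item 2 > 2), decide (PySem.List.count item 3 > 2),
   decide (PySem.List.count item 4 > 2), decide (PySem.List.count item 5 > 2),
   decide (PySem.List.count item 6 > 2), decide (PySem.List.count item 7 > 2),
   decide (PySem.List.count item 8 > 2), decide (PySem.List.count item 9 > 2)]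

-- Pre_ excludes exactly the inputs where A raises ValueError: an item violating two or more
-- of the nine digit limits makes A's second temp.remove fail ('x not in list').
def Pre_dupe (possible : List (List Int)) : Prop :=
  ∀ item ∈ possible, (condsOf item).countP id ≤ 1
instance (possible : List (List Int)) : Decidable (Pre_dupe possible) := by
  unfold Pre_dupe; infer_instance

def pvWitness_dupe : List (List Int) := [[1, 2, 3], [2, 2, 2], [1, 1]]

-- On inputs containing an item that violates two or more digit limits A raises ValueError;
-- B returns the list of the valid items.
def Raises_dupe (possible : List (List Int)) : Prop :=
  ∃ item ∈ possible, 2 ≤ (condsOf item).countP id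
instance (possible : List (List Int)) : Decidable (Raises_dupe possible) := by
  unfold Raises_dupe; infer_instance

def pvRaiseWitness_dupe : List (List Int) := [[1, 1, 2, 2, 2]]
def pvRaiseWitnessOut_dupe : List (List Int) := []

def Spec_dupe (possible : List (List Int)) (out : List (List Int)) : Prop := out = dupe_alt possible
instance (possible : List (List Int)) (out : List (List Int)) : Decidable (Spec_dupe possible out) := by unfold Spec_dupe; infer_instance

-- ===== CLAIM (what is proved, stated in full; the proofs are below) =====
def Claim_equal_dupe : Prop := ∀ (possible : List (List Int)), Dom_dupe possible → Pre_dupe possible → Spec_dupe possible (dupe possible)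
def Claim_raises_dupe : Prop := (∀ (possible : List (List Int)), Dom_dupe possible → Raises_dupe possible → ¬ Pre_dupe possible) ∧ (Dom_dupe (pvRaiseWitness_dupe) ∧ Raises_dupe (pvRaiseWitness_dupe) ∧ dupe_alt (pvRaiseWitness_dupe) = pvRaiseWitnessOut_dupe)

-- ===== LEMMAS AND PROOFS =====

-- A's inner loop as a fold over the list of its nine test outcomes
def chain (conds : List Bool) (item : List Int) (acc : Option (List (List Int))) : Option (List (List Int)) :=
  conds.foldl (fun a c => a.bind (fun temp => if c then PySem.List.remove? temp item else some temp)) acc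

lemma pyRange_1_10 : PySem.List.pyRange 1 10 1 = [1, 2, 3, 4, 5, 6, 7, 8, 9] := by decide

lemma pyRange_2_10 : PySem.List.pyRange 2 10 1 = [2, 3, 4, 5, 6, 7, 8, 9] := by decide

lemma dupeInner_eq_chain (item : List Int) (acc : Option (List (List Int))) :
    dupeInner item acc = chain (condsOf item) item acc := by
  simp [dupeInner, chain, condsOf, pyRange_1_10, List.foldl]

lemma remove?_append_self (t : List (List Int)) (item : List Int) (h : item ∉ t) :
    PySem.List.remove? (t ++ [item]) item = some t := by
  induction t with
  | nil => simp
  | cons x xs ih =>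
    have hx : x ≠ item := by intro he; exact h (by simp [he])
    rw [List.cons_append, PySem.List.remove?_cons_of_ne _ hx,
        ih (fun hm => h (List.mem_cons_of_mem _ hm))]
    rfl

lemma chain_countP_zero (conds : List Bool) (item : List Int) (t : List (List Int))
    (h : conds.countP id = 0) : chain conds item (some t) = some t := by
  induction conds with
  | nil => rfl
  | cons c cs ih =>
    rcases c with _ | _
    · simpa [chain] using ih (by simpa using h)
    · simp at h
  
lemma chain_append_self (conds : List Bool) (item : List Int) (t : List (List Int))
    (h : item ∉ t) (h1 : conds.countP id = 1) :
    chain conds item (some (t ++ [item])) = some t := by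
  induction conds with
  | nil => simp at h1
  | cons c cs ih =>
    rcases c with _ | _
    · exact (by simpa [chain] using ih (by simpa [List.countP_cons] using h1))
    · have hc : cs.countP id = 0 := by simpa [List.countP_cons] using h1
      simp [chain, remove?_append_self t item h]
      exact chain_countP_zero cs item t hc

lemma okItem_iff (item : List Int) : okItem item = true ↔ (condsOf item).countP id = 0 := by
  simp [okItem, condsOf, pyRange_2_10, List.countP_cons]
  omega

lemma dupe_loop (possible : List (List Int)) (t : List (List Int))
    (ht : ∀ x ∈ t, (condsOf x).countP id = 0)
    (hp : ∀ item ∈ possible, (condsOf item).countP id ≤ 1) :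
    possible.foldl
      (fun acc item => dupeInner item (acc.map (fun temp => temp ++ [item])))
      (some t) = some (t ++ possible.filter okItem) := by
  induction possible generalizing t with
  | nil => simp
  | cons item rest ih =>
    have hv : (condsOf item).countP id ≤ 1 := hp item (List.mem_cons_self ..)
    have hrest : ∀ x ∈ rest, (condsOf x).countP id ≤ 1 :=
      fun x hx => hp x (List.mem_cons_of_mem _ hx)
    rcases Nat.lt_or_ge ((condsOf item).countP id) 1 with h0 | h1
    · have h0 : (condsOf item).countP id = 0 := by omega
      have hok : okItem item = true := (okItem_iff item).mpr h0
      have step : dupeInner item (some (t ++ [item])) = some (t ++ [item]) := by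
        rw [dupeInner_eq_chain]; exact chain_countP_zero _ _ _ h0
      have ht' : ∀ x ∈ t ++ [item], (condsOf x).countP id = 0 := by
        intro x hx
        rcases List.mem_append.mp hx with hx | hx
        · exact ht x hx
        · simpa [List.mem_singleton.mp hx] using h0
      simp only [List.foldl_cons, Option.map_some, step]
      rw [ih (t ++ [item]) ht' hrest]
      simp [hok]
    · have h1 : (condsOf item).countP id = 1 := by omega
      have hok : okItem item = false := by
        rcases Bool.eq_false_or_eq_true (okItem item) with h | h
        · exact absurd ((okItem_iff item).mp h) (by omega)
        · exact h
      have hnm : item ∉ t := fun hm => by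
        have := ht item hm; omega
      have step : dupeInner item (some (t ++ [item])) = some t := by
        rw [dupeInner_eq_chain]; exact chain_append_self _ _ _ hnm h1
      simp only [List.foldl_cons, Option.map_some, step]
      rw [ih t ht hrest]
      simp [hok]

-- ===== VERDICT (by name: the statement is the Claim_ definition above) =====
theorem dupe_spec : Claim_equal_dupe := by
  intro possible _ hPre
  unfold Spec_dupe dupe dupe_alt
  rw [dupe_loop possible [] (by simp) hPre]
  rfl

@[simp]
theorem dupe_raises : Claim_raises_dupe := by
  unfold Claim_raises_dupe
  refine ⟨?_, by decide⟩
  intro possible _ ⟨x, hx, h2⟩ hPre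
  have := hPre x hx
  omega
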